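-- pv_equiv track=rewrite | github.com/thomasboyle/stegopy | stegopy/util/color_utils.py | is_homogeneous
-- ===== SOURCE A (Python) =====
-- from typing import Tuple, Union
--
-- def manhattan_distance(color1: Tuple[int, int, int], color2: Tuple[int, int, int]) -> int:
--     """
--     Calculate Manhattan distance between two RGB colors.
--
--     Args:
--         color1: (R, G, B) tuple
--         color2: (R, G, B) tuple
--
--     Returns:
--         Manhattan distance
--     """
--     return abs(color1[0] - color2[0]) + abs(color1[1] - color2[1]) + abs(color1[2] - color2[2])
--
-- def is_homogeneous(pixels: list, threshold: int = 10) -> bool: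
--     """
--     Check if a set of pixels represents a homogeneous (flat) region.
--     Legacy function - use is_homogeneous_fast for better performance.
--
--     Args:
--         pixels: List of (R, G, B) tuples
--         threshold: Maximum allowed color distance for homogeneous region
--
--     Returns:
--         True if region is homogeneous, False otherwise
--     """
--     if len(pixels) < 2:
--         return True
--
--     max_distance = 0
--     for i in range(len(pixels)):
--         for j in range(i + 1, len(pixels)):
--             distance = manhattan_distance(pixels[i], pixels[j])
--             max_distance = max(max_distance, distance)
--
--     return max_distance <= threshold
-- ===== SOURCE B (Python) =====
-- def is_homogeneous(pixels: list, threshold: int = 10) -> bool: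
--     """L1 diameter in one pass: for the four sign patterns (1,a,b), a,b in {1,-1},
--     the max pairwise Manhattan distance equals the largest spread of
--     p[0] + a*p[1] + b*p[2] over the pixels."""
--     if len(pixels) < 2:
--         return True
--     diam = 0
--     for a in (1, -1):
--         for b in (1, -1):
--             vals = [p[0] + a * p[1] + b * p[2] for p in pixels]
--             diam = max(diam, max(vals) - min(vals))
--     return diam <= threshold
-- ===== Notes on version B (the rewrite author's own statement) =====
-- stated objective: faster
-- what changed: Replaces the O(n^2) all-pairs Manhattan-distance scan by a single O(n) pass: the L1 diameter equals the largest spread of p[0]+a*p[1]+b*p[2] over the four sign patterns a,b in {1,-1}.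
import Mathlib
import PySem

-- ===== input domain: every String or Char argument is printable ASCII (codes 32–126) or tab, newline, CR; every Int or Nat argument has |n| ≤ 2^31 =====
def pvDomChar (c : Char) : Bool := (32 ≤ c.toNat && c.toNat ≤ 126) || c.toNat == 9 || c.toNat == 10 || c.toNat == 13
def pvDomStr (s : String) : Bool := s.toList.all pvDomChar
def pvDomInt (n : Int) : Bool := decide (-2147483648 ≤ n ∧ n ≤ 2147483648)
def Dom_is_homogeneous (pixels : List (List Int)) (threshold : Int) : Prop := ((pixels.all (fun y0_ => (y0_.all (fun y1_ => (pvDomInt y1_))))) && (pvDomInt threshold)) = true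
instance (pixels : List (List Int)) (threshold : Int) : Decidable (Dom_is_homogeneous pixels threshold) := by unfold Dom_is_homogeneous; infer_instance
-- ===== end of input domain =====

-- B replaces A's O(n^2) all-pairs scan by an O(n) pass: the L1 diameter is the largest
-- spread of p[0] + a*p[1] + b*p[2] over the four sign patterns a, b ∈ {1, -1}.

-- ===== PORT A =====
def manhattan_distance (color1 : List Int) (color2 : List Int) : Int :=
  |PySem.List.pyGetD color1 0 0 - PySem.List.pyGetD color2 0 0| +
  |PySem.List.pyGetD color1 1 0 - PySem.List.pyGetD color2 1 0| +
  |PySem.List.pyGetD color1 2 0 - PySem.List.pyGetD color2 2 0|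

def is_homogeneous (pixels : List (List Int)) (threshold : Int) : Bool :=
  if pixels.length < 2 then true
  else
    let max_distance :=
      (PySem.List.pyRange 0 (pixels.length : Int) 1).foldl
        (fun acc i =>
          (PySem.List.pyRange (i + 1) (pixels.length : Int) 1).foldl
            (fun acc2 j =>
              max acc2 (manhattan_distance (PySem.List.pyGetD pixels i [])
                                           (PySem.List.pyGetD pixels j [])))
            acc)
        0
    decide (max_distance ≤ threshold)

-- ===== PORT B =====
-- the comprehension body 'p[0] + a * p[1] + b * p[2]' of Source B
def signedSum (a : Int) (b : Int) (p : List Int) : Int :=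
  PySem.List.pyGetD p 0 0 + a * PySem.List.pyGetD p 1 0 + b * PySem.List.pyGetD p 2 0

def is_homogeneous_alt (pixels : List (List Int)) (threshold : Int) : Bool :=
  if pixels.length < 2 then true
  else
    let diam :=
      [((1 : Int), (1 : Int)), (1, -1), (-1, 1), (-1, -1)].foldl
        (fun d ab =>
          let vals := pixels.map (signedSum ab.1 ab.2)
          max d ((PySem.List.max? vals (fun y => y)).getD 0 -
                 (PySem.List.min? vals (fun y => y)).getD 0))
        0
    decide (diam ≤ threshold)

-- ===== PRECONDITION & SPEC =====
-- Pre_ excludes exactly the inputs on which Python A raises IndexError: a pixel with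
-- fewer than 3 components, reached whenever the list has at least 2 pixels.
def Pre_is_homogeneous (pixels : List (List Int)) (threshold : Int) : Prop :=
  2 ≤ pixels.length → ∀ p ∈ pixels, 3 ≤ p.length
instance (pixels : List (List Int)) (threshold : Int) : Decidable (Pre_is_homogeneous pixels threshold) := by unfold Pre_is_homogeneous; infer_instance

def pvWitness_is_homogeneous : List (List Int) × Int := ([[0, 0, 0], [1, 2, 3]], 10)

def Spec_is_homogeneous (pixels : List (List Int)) (threshold : Int) (out : Bool) : Prop := out = is_homogeneous_alt pixels threshold
instance (pixels : List (List Int)) (threshold : Int) (out : Bool) : Decidable (Spec_is_homogeneous pixels threshold out) := by unfold Spec_is_homogeneous; infer_instance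

-- ===== CLAIM (what is proved, stated in full; the proofs are below) =====
def Claim_equal_is_homogeneous : Prop := ∀ (pixels : List (List Int)) (threshold : Int), Dom_is_homogeneous pixels threshold → Pre_is_homogeneous pixels threshold → Spec_is_homogeneous pixels threshold (is_homogeneous pixels threshold)

-- ===== LEMMAS AND PROOFS =====

-- proof-side names for the two accumulated values
def pairMax (pixels : List (List Int)) : Int :=
  (PySem.List.pyRange 0 (pixels.length : Int) 1).foldl
    (fun acc i =>
      (PySem.List.pyRange (i + 1) (pixels.length : Int) 1).foldl
        (fun acc2 j =>
          max acc2 (manhattan_distance (PySem.List.pyGetD pixels i [])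
                                       (PySem.List.pyGetD pixels j [])))
        acc)
    0

def spread (a : Int) (b : Int) (pixels : List (List Int)) : Int :=
  (PySem.List.max? (pixels.map (signedSum a b)) (fun y => y)).getD 0 -
  (PySem.List.min? (pixels.map (signedSum a b)) (fun y => y)).getD 0

def diamVal (pixels : List (List Int)) : Int :=
  [((1 : Int), (1 : Int)), (1, -1), (-1, 1), (-1, -1)].foldl
    (fun d ab =>
      let vals := pixels.map (signedSum ab.1 ab.2)
      max d ((PySem.List.max? vals (fun y => y)).getD 0 -
             (PySem.List.min? vals (fun y => y)).getD 0))
    0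

lemma is_homogeneous_eq (pixels : List (List Int)) (threshold : Int) :
    is_homogeneous pixels threshold =
      if pixels.length < 2 then true else decide (pairMax pixels ≤ threshold) := rfl

lemma is_homogeneous_alt_eq (pixels : List (List Int)) (threshold : Int) :
    is_homogeneous_alt pixels threshold =
      if pixels.length < 2 then true else decide (diamVal pixels ≤ threshold) := rfl

lemma diamVal_eq (pixels : List (List Int)) :
    diamVal pixels =
      max (max (max (max 0 (spread 1 1 pixels)) (spread 1 (-1) pixels))
        (spread (-1) 1 pixels)) (spread (-1) (-1) pixels) := rfl

-- generic upper/lower bound transport through a foldl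
lemma foldl_le_of_step {α : Type} (c : Int) (l : List α) (step : Int → α → Int)
    (h : ∀ acc x, x ∈ l → acc ≤ c → step acc x ≤ c) :
    ∀ acc, acc ≤ c → l.foldl step acc ≤ c := by
  induction l with
  | nil => intro acc hacc; simpa using hacc
  | cons x t ih =>
    intro acc hacc
    exact ih (fun a y hy ha => h a y (List.mem_cons_of_mem _ hy) ha) _
      (h acc x List.mem_cons_self hacc)

lemma le_foldl_of_step {α : Type} (l : List α) (step : Int → α → Int)
    (h : ∀ acc x, x ∈ l → acc ≤ step acc x) :
    ∀ acc, acc ≤ l.foldl step acc := by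
  induction l with
  | nil => intro acc; simp
  | cons x t ih =>
    intro acc
    exact le_trans (h acc x List.mem_cons_self)
      (ih (fun a y hy => h a y (List.mem_cons_of_mem _ hy)) _)

lemma le_foldl_of_mem {α : Type} (l : List α) (step : Int → α → Int) (v : Int)
    (hmono : ∀ acc x, x ∈ l → acc ≤ step acc x)
    (x : α) (hx : x ∈ l) (hv : ∀ acc, v ≤ step acc x) :
    ∀ acc, v ≤ l.foldl step acc := by
  induction l with
  | nil => cases hx
  | cons y t ih =>
    intro acc
    rcases List.mem_cons.1 hx with rfl | hx'
    · exact le_trans (hv acc)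
        (le_foldl_of_step t step (fun a z hz => hmono a z (List.mem_cons_of_mem _ hz)) _)
    · exact ih (fun a z hz => hmono a z (List.mem_cons_of_mem _ hz)) hx' _

lemma man_self (p : List Int) : manhattan_distance p p = 0 := by
  simp [manhattan_distance]

lemma man_comm (p q : List Int) : manhattan_distance p q = manhattan_distance q p := by
  simp [manhattan_distance, abs_sub_comm]

lemma man_le_of_bounds (p q : List Int) (c : Int)
    (h1 : signedSum 1 1 p - signedSum 1 1 q ≤ c)
    (h2 : signedSum 1 1 q - signedSum 1 1 p ≤ c)
    (h3 : signedSum 1 (-1) p - signedSum 1 (-1) q ≤ c)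
    (h4 : signedSum 1 (-1) q - signedSum 1 (-1) p ≤ c)
    (h5 : signedSum (-1) 1 p - signedSum (-1) 1 q ≤ c)
    (h6 : signedSum (-1) 1 q - signedSum (-1) 1 p ≤ c)
    (h7 : signedSum (-1) (-1) p - signedSum (-1) (-1) q ≤ c)
    (h8 : signedSum (-1) (-1) q - signedSum (-1) (-1) p ≤ c) :
    manhattan_distance p q ≤ c := by
  simp only [signedSum, manhattan_distance] at *
  rcases abs_cases (PySem.List.pyGetD p 0 0 - PySem.List.pyGetD q 0 0) with ⟨hx, _⟩ | ⟨hx, _⟩ <;>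
    rcases abs_cases (PySem.List.pyGetD p 1 0 - PySem.List.pyGetD q 1 0) with ⟨hy, _⟩ | ⟨hy, _⟩ <;>
    rcases abs_cases (PySem.List.pyGetD p 2 0 - PySem.List.pyGetD q 2 0) with ⟨hz, _⟩ | ⟨hz, _⟩ <;>
    omega

lemma signed_sub_le_man (a b : Int) (ha : a = 1 ∨ a = -1) (hb : b = 1 ∨ b = -1)
    (p q : List Int) : signedSum a b p - signedSum a b q ≤ manhattan_distance p q := by
  rcases ha with rfl | rfl <;> rcases hb with rfl | rfl <;>
    · simp only [signedSum, manhattan_distance]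
      rcases abs_cases (PySem.List.pyGetD p 0 0 - PySem.List.pyGetD q 0 0) with ⟨hx, _⟩ | ⟨hx, _⟩ <;>
        rcases abs_cases (PySem.List.pyGetD p 1 0 - PySem.List.pyGetD q 1 0) with ⟨hy, _⟩ | ⟨hy, _⟩ <;>
        rcases abs_cases (PySem.List.pyGetD p 2 0 - PySem.List.pyGetD q 2 0) with ⟨hz, _⟩ | ⟨hz, _⟩ <;>
        omega

-- ===== A-side characterisation of pairMax =====

lemma pairMax_nonneg (pixels : List (List Int)) : 0 ≤ pairMax pixels := by
  unfold pairMax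
  exact le_foldl_of_step _ _
    (fun acc i _ => (PySem.List.le_foldl_max_int _ _ acc).1) 0

lemma pairMax_ub (pixels : List (List Int)) (i j : Int)
    (h0 : 0 ≤ i) (hij : i < j) (hjn : j < (pixels.length : Int)) :
    manhattan_distance (PySem.List.pyGetD pixels i []) (PySem.List.pyGetD pixels j []) ≤
      pairMax pixels := by
  unfold pairMax
  refine le_foldl_of_mem _ _ _
    (fun acc x _ => (PySem.List.le_foldl_max_int _ _ acc).1) i
    (PySem.List.mem_pyRange_one.mpr ⟨h0, lt_trans hij hjn⟩) (fun acc => ?_) 0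
  exact (PySem.List.le_foldl_max_int _ _ acc).2 j
    (PySem.List.mem_pyRange_one.mpr ⟨by omega, hjn⟩)

lemma pairMax_le (pixels : List (List Int)) (c : Int) (hc : 0 ≤ c)
    (hall : ∀ p ∈ pixels, ∀ q ∈ pixels, manhattan_distance p q ≤ c) :
    pairMax pixels ≤ c := by
  unfold pairMax
  refine foldl_le_of_step c _ _ (fun acc i hi hacc => ?_) 0 hc
  refine foldl_le_of_step c _ _ (fun acc2 j hj hacc2 => ?_) acc hacc
  have hi' := PySem.List.mem_pyRange_one.mp hi
  have hj' := PySem.List.mem_pyRange_one.mp hj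
  have hpi : PySem.List.pyGetD pixels i [] ∈ pixels :=
    PySem.List.pyGetD_mem pixels [] ⟨by omega, by omega⟩
  have hpj : PySem.List.pyGetD pixels j [] ∈ pixels :=
    PySem.List.pyGetD_mem pixels [] ⟨by omega, by omega⟩
  exact max_le hacc2 (hall _ hpi _ hpj)

lemma pairMax_ub_mem (pixels : List (List Int)) (p q : List Int)
    (hp : p ∈ pixels) (hq : q ∈ pixels) :
    manhattan_distance p q ≤ pairMax pixels := by
  obtain ⟨i, hi, rfl⟩ := List.getElem_of_mem hp
  obtain ⟨j, hj, rfl⟩ := List.getElem_of_mem hq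
  have ei : PySem.List.pyGetD pixels (i : Int) [] = pixels[i] := by
    simpa using PySem.List.pyGetD_eq_getElem (xs := pixels) (i := (i : Int)) (d := [])
      (by omega) (by exact_mod_cast hi)
  have ej : PySem.List.pyGetD pixels (j : Int) [] = pixels[j] := by
    simpa using PySem.List.pyGetD_eq_getElem (xs := pixels) (i := (j : Int)) (d := [])
      (by omega) (by exact_mod_cast hj)
  rcases Nat.lt_trichotomy i j with hij | rfl | hij
  · have := pairMax_ub pixels (i : Int) (j : Int) (by omega) (by exact_mod_cast hij)
      (by exact_mod_cast hj)
    rwa [ei, ej] at this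
  · rw [man_self]; exact pairMax_nonneg pixels
  · have := pairMax_ub pixels (j : Int) (i : Int) (by omega) (by exact_mod_cast hij)
      (by exact_mod_cast hi)
    rw [ei, ej, man_comm] at this
    exact this

-- ===== B-side characterisation of the four spreads =====

lemma spread_attained (a b : Int) (pixels : List (List Int)) (hne : pixels ≠ []) :
    ∃ p ∈ pixels, ∃ q ∈ pixels,
      spread a b pixels = signedSum a b p - signedSum a b q := by
  have hvne : pixels.map (signedSum a b) ≠ [] := by
    simpa using hne
  rcases hmx : PySem.List.max? (pixels.map (signedSum a b)) (fun y => y) with _ | mx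
  · exact absurd ((PySem.List.max?_eq_none_iff _ _).mp hmx) hvne
  rcases hmn : PySem.List.min? (pixels.map (signedSum a b)) (fun y => y) with _ | mn
  · exact absurd ((PySem.List.min?_eq_none_iff _ _).mp hmn) hvne
  obtain ⟨p, hp, hpe⟩ := List.mem_map.1 (PySem.List.max?_mem hmx)
  obtain ⟨q, hq, hqe⟩ := List.mem_map.1 (PySem.List.min?_mem hmn)
  exact ⟨p, hp, q, hq, by simp [spread, hmx, hmn, hpe, hqe]⟩

lemma le_spread (a b : Int) (pixels : List (List Int)) (p q : List Int)
    (hp : p ∈ pixels) (hq : q ∈ pixels) :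
    signedSum a b p - signedSum a b q ≤ spread a b pixels := by
  have hvne : pixels.map (signedSum a b) ≠ [] := by
    intro h; rw [List.map_eq_nil_iff] at h; subst h; cases hp
  rcases hmx : PySem.List.max? (pixels.map (signedSum a b)) (fun y => y) with _ | mx
  · exact absurd ((PySem.List.max?_eq_none_iff _ _).mp hmx) hvne
  rcases hmn : PySem.List.min? (pixels.map (signedSum a b)) (fun y => y) with _ | mn
  · exact absurd ((PySem.List.min?_eq_none_iff _ _).mp hmn) hvne
  have h1 : signedSum a b p ≤ mx :=
    PySem.List.max?_isMax hmx _ (List.mem_map_of_mem hp)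
  have h2 : mn ≤ signedSum a b q :=
    PySem.List.min?_isMin hmn _ (List.mem_map_of_mem hq)
  simp only [spread, hmx, hmn, Option.getD_some]
  omega

lemma diamVal_nonneg (pixels : List (List Int)) : 0 ≤ diamVal pixels := by
  rw [diamVal_eq]; omega

lemma spread_le_diamVal (a b : Int) (pixels : List (List Int))
    (ha : a = 1 ∨ a = -1) (hb : b = 1 ∨ b = -1) :
    spread a b pixels ≤ diamVal pixels := by
  rw [diamVal_eq]
  rcases ha with rfl | rfl <;> rcases hb with rfl | rfl <;> omega

lemma diamVal_ub_mem (pixels : List (List Int)) (p q : List Int)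
    (hp : p ∈ pixels) (hq : q ∈ pixels) :
    manhattan_distance p q ≤ diamVal pixels := by
  refine man_le_of_bounds p q _ ?_ ?_ ?_ ?_ ?_ ?_ ?_ ?_ <;>
    exact le_trans (le_spread _ _ pixels _ _ (by assumption) (by assumption))
      (spread_le_diamVal _ _ pixels (by norm_num) (by norm_num))

lemma diamVal_le (pixels : List (List Int)) (hne : pixels ≠ []) (c : Int) (hc : 0 ≤ c)
    (hall : ∀ p ∈ pixels, ∀ q ∈ pixels, manhattan_distance p q ≤ c) :
    diamVal pixels ≤ c := by
  have key : ∀ a b : Int, a = 1 ∨ a = -1 → b = 1 ∨ b = -1 → spread a b pixels ≤ c := by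
    intro a b ha hb
    obtain ⟨p, hp, q, hq, he⟩ := spread_attained a b pixels hne
    rw [he]
    exact le_trans (signed_sub_le_man a b ha hb p q) (hall p hp q hq)
  rw [diamVal_eq]
  have h1 := key 1 1 (Or.inl rfl) (Or.inl rfl)
  have h2 := key 1 (-1) (Or.inl rfl) (Or.inr rfl)
  have h3 := key (-1) 1 (Or.inr rfl) (Or.inl rfl)
  have h4 := key (-1) (-1) (Or.inr rfl) (Or.inr rfl)
  omega

lemma pairMax_eq_diamVal (pixels : List (List Int)) (h2 : 2 ≤ pixels.length) :
    pairMax pixels = diamVal pixels := by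
  have hne : pixels ≠ [] := by intro h; subst h; simp at h2
  refine le_antisymm ?_ ?_
  · exact pairMax_le pixels _ (diamVal_nonneg pixels)
      (fun p hp q hq => diamVal_ub_mem pixels p q hp hq)
  · exact diamVal_le pixels hne _ (pairMax_nonneg pixels)
      (fun p hp q hq => pairMax_ub_mem pixels p q hp hq)

-- ===== VERDICT (by name: the statement is the Claim_ definition above) =====
theorem is_homogeneous_spec : Claim_equal_is_homogeneous := by
  intro pixels threshold _ _
  unfold Spec_is_homogeneous
  rw [is_homogeneous_eq, is_homogeneous_alt_eq]
  by_cases h : pixels.length < 2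
  · simp [h]
  · rw [if_neg h, if_neg h, pairMax_eq_diamVal pixels (by omega)]
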